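-- pv_equiv track=rewrite | github.com/alyaazab/8-puzzle | puzzle.py | isValidState
-- ===== SOURCE A (Python) =====
-- def isValidState(puzzle):
--   values = {'0', '1', '2', '3', '4', '5', '6', '7', '8'}
--   for i in range(len(puzzle)):
--     for j in range(len(puzzle[i])):
--       if puzzle[i][j] in values:
--         values.remove(puzzle[i][j])
--       else:
--         return False
--
--   if len(values) > 0:
--     return False
--   return True
-- ===== SOURCE B (Python) =====
-- def isValidState(puzzle):
--   cells = [cell for row in puzzle for cell in row]
--   return sorted(cells) == ['0', '1', '2', '3', '4', '5', '6', '7', '8']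
-- ===== Notes on version B (the rewrite author's own statement) =====
-- stated objective: simpler
-- what changed: Replaces the nested index loops that stream cells through a shrinking set with early exit by a flatten-then-compare: collect all cells into one list and test whether sorting it yields exactly ['0'..'8'].
import Mathlib
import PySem

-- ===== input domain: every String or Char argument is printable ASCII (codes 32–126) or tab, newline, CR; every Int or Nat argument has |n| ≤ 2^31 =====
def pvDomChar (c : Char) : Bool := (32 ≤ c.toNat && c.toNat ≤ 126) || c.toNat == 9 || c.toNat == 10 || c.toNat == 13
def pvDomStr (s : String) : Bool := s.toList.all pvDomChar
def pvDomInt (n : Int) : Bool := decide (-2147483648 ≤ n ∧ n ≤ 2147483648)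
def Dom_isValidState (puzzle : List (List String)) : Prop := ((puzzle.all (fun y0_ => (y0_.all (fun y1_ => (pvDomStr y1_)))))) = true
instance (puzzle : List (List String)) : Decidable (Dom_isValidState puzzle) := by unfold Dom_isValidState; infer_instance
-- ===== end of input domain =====

-- B flattens the grid once and compares its sorted cell list with ['0'..'8'] — simpler than A's
-- streaming remove-from-set loop with early exit; return value proved equal on all inputs.

-- ===== PORT A =====
-- inner loop: for j in range(len(row)): if row[j] in values: values.remove(row[j]) else: return False
def pvGoCellA : List String → PySem.Set String → Option (PySem.Set String)
  | [], v => some v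
  | c :: cs, v => if PySem.Set.contains v c then pvGoCellA cs (PySem.Set.discard v c) else none

-- outer loop over the rows, threading the set; none = the early 'return False'
def pvGoRowA : List (List String) → PySem.Set String → Option (PySem.Set String)
  | [], v => some v
  | r :: rs, v =>
    match pvGoCellA r v with
    | none => none
    | some v' => pvGoRowA rs v'

def isValidState (puzzle : List (List String)) : Bool :=
  match pvGoRowA puzzle (PySem.Set.ofList ["0", "1", "2", "3", "4", "5", "6", "7", "8"]) with
  | none => false
  | some values => if 0 < values.length then false else true

-- ===== PORT B =====
def isValidState_alt (puzzle : List (List String)) : Bool :=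
  let cells := puzzle.flatMap (fun row => row)
  decide (PySem.List.sorted cells (fun x => x) false = ["0", "1", "2", "3", "4", "5", "6", "7", "8"])

-- ===== PRECONDITION & SPEC =====
def Spec_isValidState (puzzle : List (List String)) (out : Bool) : Prop := out = isValidState_alt puzzle
instance (puzzle : List (List String)) (out : Bool) : Decidable (Spec_isValidState puzzle out) := by unfold Spec_isValidState; infer_instance

-- ===== CLAIM (what is proved, stated in full; the proofs are below) =====
def Claim_equal_isValidState : Prop := ∀ (puzzle : List (List String)), Dom_isValidState puzzle → Spec_isValidState puzzle (isValidState puzzle)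

-- ===== LEMMAS AND PROOFS =====

theorem pvGoCellA_append (xs ys : List String) (v : PySem.Set String) :
    pvGoCellA (xs ++ ys) v = (pvGoCellA xs v).bind (fun v' => pvGoCellA ys v') := by
  induction xs generalizing v with
  | nil => simp [pvGoCellA]
  | cons c cs ih =>
    simp only [List.cons_append, pvGoCellA]
    split_ifs with h
    · exact ih _
    · rfl

theorem pvGoRowA_flatten (rows : List (List String)) (v : PySem.Set String) :
    pvGoRowA rows v = pvGoCellA (rows.flatMap (fun row => row)) v := by
  induction rows generalizing v with
  | nil => simp [pvGoRowA, pvGoCellA]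
  | cons r rs ih =>
    simp only [List.flatMap_cons, pvGoRowA, pvGoCellA_append]
    cases pvGoCellA r v with
    | none => rfl
    | some v' => simpa using ih v'

theorem pvGoCellA_empty_iff (cs : List String) (v : PySem.Set String) (hv : v.Nodup) :
    pvGoCellA cs v = some [] ↔ cs.Perm v := by
  induction cs generalizing v with
  | nil =>
    simp only [pvGoCellA, Option.some.injEq]
    exact ⟨fun h => by simp [h], fun h => List.nil_perm.mp h⟩
  | cons c cs ih =>
    simp only [pvGoCellA]
    by_cases hc : c ∈ v
    · have hcontains : PySem.Set.contains v c = true :=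
        List.elem_eq_true_of_mem hc
      rw [if_pos hcontains]
      have herase : PySem.Set.discard v c = v.erase c := by
        unfold PySem.Set.discard
        exact (hv.erase_eq_filter c).symm
      rw [herase, ih _ (hv.erase c), List.cons_perm_iff_perm_erase]
      exact ⟨fun h => ⟨hc, h⟩, fun h => h.2⟩
    · have hcontains : PySem.Set.contains v c = false := by
        simp only [PySem.Set.contains, List.contains_eq_mem, decide_eq_false_iff_not]
        exact hc
      simp only [hcontains, Bool.false_eq_true, if_false]
      constructor
      · intro h; exact absurd h (by simp)
      · intro h; exact absurd (h.mem_iff.mp (List.mem_cons_self)) hc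

theorem pvA_iff (puzzle : List (List String)) :
    isValidState puzzle = true ↔
      (puzzle.flatMap (fun row => row)).Perm ["0", "1", "2", "3", "4", "5", "6", "7", "8"] := by
  have hset : PySem.Set.ofList ["0", "1", "2", "3", "4", "5", "6", "7", "8"]
      = ["0", "1", "2", "3", "4", "5", "6", "7", "8"] := by decide
  have hnd : (["0", "1", "2", "3", "4", "5", "6", "7", "8"] : List String).Nodup := by decide
  unfold isValidState
  rw [pvGoRowA_flatten, hset]
  rw [← pvGoCellA_empty_iff _ _ hnd]
  cases h : pvGoCellA (puzzle.flatMap (fun row => row)) ["0", "1", "2", "3", "4", "5", "6", "7", "8"] with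
  | none => simp
  | some v =>
    simp only [Option.some.injEq]
    constructor
    · intro hb
      by_cases hlen : 0 < v.length
      · rw [if_pos hlen] at hb; exact absurd hb (by simp)
      · exact List.eq_nil_of_length_eq_zero (by omega)
    · intro hb; rw [hb]; simp

theorem pvB_iff (puzzle : List (List String)) :
    isValidState_alt puzzle = true ↔
      (puzzle.flatMap (fun row => row)).Perm ["0", "1", "2", "3", "4", "5", "6", "7", "8"] := by
  unfold isValidState_alt
  simp only [decide_eq_true_eq]
  have hsorted : PySem.List.sorted (["0", "1", "2", "3", "4", "5", "6", "7", "8"] : List String)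
      (fun x => x) false = ["0", "1", "2", "3", "4", "5", "6", "7", "8"] :=
    PySem.List.sorted_eq_self_of_pairwise _ (fun x => x) (by norm_num; decide)
  conv_lhs => rw [← hsorted]
  rw [PySem.List.sorted_id_eq_sorted_id_iff_perm]

-- ===== VERDICT (by name: the statement is the Claim_ definition above) =====
theorem isValidState_spec : Claim_equal_isValidState := by
  intro puzzle _
  unfold Spec_isValidState
  rw [Bool.eq_iff_iff, pvA_iff, pvB_iff]
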